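-- pv_equiv track=rewrite | github.com/PolasekT/ICTree | PerceptualMetric/psrc/perceptree/common/configuration.py | split_with_keywords
-- ===== SOURCE A (Python) =====
-- def split_with_keywords(to_split: [str], keywords: [str]) -> [[str]]:
--     """
--     Split given list of strings into sub-lists which
--     contain only one keyword each.
--
--     :param to_split: Vector of strings to split.
--     :param keywords: Keywords to split the list by.
--
--     :return: Returns list of list of lists split by keywords.
--     """
--
--     result = []
--     used_keywords = []
--     last_string_idx = 0
--
--     for idx, val in enumerate(to_split):
--         if val not in keywords or val in used_keywords:
--             continue
--
--         if last_string_idx != idx: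
--             result.append(to_split[last_string_idx:idx])
--
--         last_string_idx = idx
--         used_keywords.append(val)
--
--     result.append(to_split[last_string_idx:])
--
--     return result
-- ===== SOURCE B (Python) =====
-- def split_with_keywords(to_split: [str], keywords: [str]) -> [[str]]:
--     """Split to_split into segments at the first occurrence of each keyword.
--
--     Two-phase rewrite: first collect the cut positions, then slice.
--     """
--     seen = set()
--     cuts = []
--     for idx, val in enumerate(to_split):
--         if val in keywords and val not in seen:
--             cuts.append(idx)
--             seen.add(val)
--
--     indices = [0] + cuts
--     result = [to_split[a:b] for a, b in zip(indices, indices[1:]) if a != b]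
--     result.append(to_split[indices[-1]:])
--     return result
-- ===== Notes on version B (the rewrite author's own statement) =====
-- stated objective: alternative
-- what changed: A interleaves boundary detection and slicing in one stateful loop (result, used_keywords, last_string_idx); B first collects the first-occurrence cut indices with a seen-set, then builds the segments by slicing between consecutive indices with a comprehension plus an unconditional tail append.
import Mathlib
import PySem

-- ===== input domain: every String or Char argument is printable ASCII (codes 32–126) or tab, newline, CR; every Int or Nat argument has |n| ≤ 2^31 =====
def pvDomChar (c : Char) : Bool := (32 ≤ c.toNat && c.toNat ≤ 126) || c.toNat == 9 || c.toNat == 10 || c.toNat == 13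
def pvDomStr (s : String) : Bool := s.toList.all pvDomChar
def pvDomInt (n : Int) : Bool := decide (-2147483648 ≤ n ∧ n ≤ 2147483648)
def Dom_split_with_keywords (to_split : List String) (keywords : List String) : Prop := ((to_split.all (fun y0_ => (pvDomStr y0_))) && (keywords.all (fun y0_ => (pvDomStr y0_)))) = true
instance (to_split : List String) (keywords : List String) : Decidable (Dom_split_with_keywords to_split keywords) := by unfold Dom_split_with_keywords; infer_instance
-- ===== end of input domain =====

-- B separates boundary detection (one scan collecting first-occurrence cut indices with a set)
-- from slicing (a comprehension over consecutive index pairs); alternative decomposition, same cost.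

-- ===== PORT A =====
-- literal transliteration of A: one fold carrying (result, used_keywords, last_string_idx)
def split_with_keywords (to_split : List String) (keywords : List String) : List (List String) :=
  let st := (PySem.List.enumerate to_split 0).foldl
    (fun (st : List (List String) × List String × Int) p =>
      if p.2 ∉ keywords ∨ p.2 ∈ st.2.1 then st
      else
        ((if st.2.2 ≠ p.1 then st.1 ++ [PySem.List.slice to_split (some st.2.2) (some p.1)] else st.1),
         st.2.1 ++ [p.2], p.1))
    ([], [], 0)
  st.1 ++ [PySem.List.slice to_split (some st.2.2) none]

-- ===== PORT B =====
-- literal transliteration of Source B: collect cuts with a seen-set, then slice between consecutive indices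
def split_with_keywords_alt (to_split : List String) (keywords : List String) : List (List String) :=
  let sc := (PySem.List.enumerate to_split 0).foldl
    (fun (sc : PySem.Set String × List Int) p =>
      if p.2 ∈ keywords ∧ p.2 ∉ sc.1 then (PySem.Set.add sc.1 p.2, sc.2 ++ [p.1]) else sc)
    (PySem.Set.empty, [])
  let indices : List Int := 0 :: sc.2
  let result := (indices.zip (indices.drop 1)).filterMap
    (fun ab => if ab.1 ≠ ab.2 then some (PySem.List.slice to_split (some ab.1) (some ab.2)) else none)
  result ++ [PySem.List.slice to_split (some indices.getLast!) none]

-- ===== PRECONDITION & SPEC =====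
def Spec_split_with_keywords (to_split : List String) (keywords : List String) (out : List (List String)) : Prop := out = split_with_keywords_alt to_split keywords
instance (to_split : List String) (keywords : List String) (out : List (List String)) : Decidable (Spec_split_with_keywords to_split keywords out) := by unfold Spec_split_with_keywords; infer_instance

-- ===== CLAIM (what is proved, stated in full; the proofs are below) =====
def Claim_equal_split_with_keywords : Prop := ∀ (to_split : List String) (keywords : List String), Dom_split_with_keywords to_split keywords → Spec_split_with_keywords to_split keywords (split_with_keywords to_split keywords)

-- ===== LEMMAS AND PROOFS =====

-- the cut indices: first occurrence of each keyword among the enumerated pairs, given keywords already used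
def cutsFrom (keywords : List String) : List (Int × String) → List String → List Int
  | [], _ => []
  | p :: rest, used =>
    if p.2 ∈ keywords ∧ p.2 ∉ used then p.1 :: cutsFrom keywords rest (used ++ [p.2])
    else cutsFrom keywords rest used

-- the segments determined by a start index and the list of cut indices (empty gaps dropped, tail kept)
def segs (to_split : List String) (last : Int) : List Int → List (List String)
  | [] => [PySem.List.slice to_split (some last) none]
  | c :: rest =>
    (if last ≠ c then [PySem.List.slice to_split (some last) (some c)] else []) ++ segs to_split c rest

theorem foldA_segs (to_split keywords : List String) (pairs : List (Int × String))
    (res : List (List String)) (used : List String) (last : Int) :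
    (pairs.foldl
      (fun (st : List (List String) × List String × Int) p =>
        if p.2 ∉ keywords ∨ p.2 ∈ st.2.1 then st
        else
          ((if st.2.2 ≠ p.1 then st.1 ++ [PySem.List.slice to_split (some st.2.2) (some p.1)] else st.1),
           st.2.1 ++ [p.2], p.1))
      (res, used, last)).1 ++
      [PySem.List.slice to_split
        (some (pairs.foldl
          (fun (st : List (List String) × List String × Int) p =>
            if p.2 ∉ keywords ∨ p.2 ∈ st.2.1 then st
            else
              ((if st.2.2 ≠ p.1 then st.1 ++ [PySem.List.slice to_split (some st.2.2) (some p.1)] else st.1),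
               st.2.1 ++ [p.2], p.1))
          (res, used, last)).2.2) none] =
    res ++ segs to_split last (cutsFrom keywords pairs used) := by
  induction pairs generalizing res used last with
  | nil => simp [cutsFrom, segs]
  | cons p rest ih =>
    simp only [ne_eq, ite_not] at ih
    by_cases h : p.2 ∈ keywords ∧ p.2 ∉ used
    · have hneg : ¬(p.2 ∉ keywords ∨ p.2 ∈ used) := by tauto
      by_cases hl : last ≠ p.1 <;>
        simp [cutsFrom, segs, h, hl, List.foldl_cons, ih, List.append_assoc]
    · have hpos : p.2 ∉ keywords ∨ p.2 ∈ used := by tauto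
      simp [cutsFrom, h, hpos, List.foldl_cons, ih]

theorem foldB_cuts (keywords : List String) (pairs : List (Int × String))
    (seen : PySem.Set String) (cacc : List Int) :
    (pairs.foldl
      (fun (sc : PySem.Set String × List Int) p =>
        if p.2 ∈ keywords ∧ p.2 ∉ sc.1 then (PySem.Set.add sc.1 p.2, sc.2 ++ [p.1]) else sc)
      (seen, cacc)).2 = cacc ++ cutsFrom keywords pairs seen := by
  induction pairs generalizing seen cacc with
  | nil => simp [cutsFrom]
  | cons p rest ih =>
    by_cases h : p.2 ∈ keywords ∧ p.2 ∉ seen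
    · rw [List.foldl_cons, if_pos h, PySem.Set.add_of_not_mem h.2, ih]
      simp [cutsFrom, h]
    · rw [List.foldl_cons, if_neg h, ih]
      simp [cutsFrom, h]

theorem buildB_segs (to_split : List String) (last : Int) (cuts : List Int) :
    (((last :: cuts).zip ((last :: cuts).drop 1)).filterMap
      (fun ab => if ab.1 ≠ ab.2 then some (PySem.List.slice to_split (some ab.1) (some ab.2)) else none)) ++
      [PySem.List.slice to_split (some ((last :: cuts).getLast!)) none] =
    segs to_split last cuts := by
  induction cuts generalizing last with
  | nil => simp [segs]
  | cons c rest ih =>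
    have : (last :: c :: rest).getLast! = (c :: rest).getLast! := by
      simp [List.getLast!, List.getLast]
    rw [this]
    by_cases hl : last ≠ c <;>
      simp [segs, hl, ← ih c]

-- ===== VERDICT (by name: the statement is the Claim_ definition above) =====
theorem split_with_keywords_spec : Claim_equal_split_with_keywords := by
  intro to_split keywords _
  show split_with_keywords to_split keywords = split_with_keywords_alt to_split keywords
  unfold split_with_keywords split_with_keywords_alt
  dsimp only
  rw [foldA_segs to_split keywords (PySem.List.enumerate to_split 0) [] [] 0,
    foldB_cuts keywords (PySem.List.enumerate to_split 0) PySem.Set.empty [],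
    List.nil_append]
  exact (buildB_segs to_split 0 (cutsFrom keywords (PySem.List.enumerate to_split 0) PySem.Set.empty)).symm
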